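-- pv_equiv track=rewrite | github.com/lowRISC/opentitan | util/tlgen/lib.py | find_pow2_size
-- ===== SOURCE A (Python) =====
-- from typing import Any, Dict, List, Optional, Tuple, Union
--
-- def find_pow2_size(addr: Dict[Any, Any],
--                    min_size: int,
--                    next_value: int) -> int:
--     """Find smallest power of 2 value greater than min_size by given addr.
--
--     For instance, {addr:0x4000_0000, min_size:0x21000} and `next_value` as
--     0x40080000, the result will be 0x4_0000
--
--     But it should return result not exceeding the base_addr's leading one bit
--     position. For instance, if the base_addr is 0x4003_0000, the return value
--     should be less than or equal to 0x1_0000. Cannot be 0x4_0000. So, this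
--     case, the function returns the original min_size value 0x21000.
--     """
--     base_addr = int(addr["base_addr"], 0)
--
--     diff = next_value - base_addr
--
--     # Find the least one bit position.
--     # If base_addr is 0, then any value can be used
--     if not base_addr == 0:
--         leading_one = 1
--         while True:
--             if base_addr & leading_one != 0:
--                 break
--             leading_one = leading_one << 1
--
--         if leading_one <= diff:
--             diff = leading_one
--
--     i = 1
--     while True:
--         i = i << 1
--         if i >= min_size:
--             break
--
--     # If found pow2 value is greater than diff, it cannot be used. Just use
--     # min_size then the tool will use comparators (>=, <=)
--     if i > diff:
--         i = min_size
--
--     # Minimum size is one 32bit register.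
--     assert i >= 0x4
--
--     return i
-- ===== SOURCE B (Python) =====
-- def find_pow2_size(addr, min_size, next_value):
--     base_addr = int(addr["base_addr"], 0)
--     diff = next_value - base_addr
--
--     # Closed-form lowest set bit instead of A's bit-scanning loop.
--     if base_addr != 0:
--         diff = min(diff, base_addr & -base_addr)
--
--     # Smallest power of two >= min_size (never less than 2, matching the
--     # pre-shift behaviour of A's doubling loop), via bit_length.
--     i = 2 if min_size <= 2 else 1 << (min_size - 1).bit_length()
--
--     if i > diff:
--         i = min_size
--
--     # Minimum size is one 32bit register.
--     assert i >= 0x4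
--
--     return i
-- ===== Notes on version B (the rewrite author's own statement) =====
-- stated objective: idiomatic
-- what changed: Both bit-scanning while-loops are replaced by closed-form bit arithmetic: the lowest set bit of base_addr is computed as base_addr & -base_addr and the smallest power of two >= min_size (never below 2) as 1 << (min_size-1).bit_length().
import Mathlib
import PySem

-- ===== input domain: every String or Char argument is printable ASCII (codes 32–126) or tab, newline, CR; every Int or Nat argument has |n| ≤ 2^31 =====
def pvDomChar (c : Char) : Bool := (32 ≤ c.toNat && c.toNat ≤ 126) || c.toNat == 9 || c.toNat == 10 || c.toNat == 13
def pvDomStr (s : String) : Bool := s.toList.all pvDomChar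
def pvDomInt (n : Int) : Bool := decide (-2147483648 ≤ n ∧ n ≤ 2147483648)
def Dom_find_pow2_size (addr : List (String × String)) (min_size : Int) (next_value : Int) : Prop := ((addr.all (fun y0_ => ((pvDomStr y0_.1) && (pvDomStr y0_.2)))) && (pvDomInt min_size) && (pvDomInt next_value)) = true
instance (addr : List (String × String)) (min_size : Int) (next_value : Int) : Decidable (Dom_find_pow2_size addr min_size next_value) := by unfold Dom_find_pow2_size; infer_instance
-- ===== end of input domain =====

-- B replaces A's two bit-scanning loops by closed-form bit arithmetic
-- (base_addr & -base_addr and bit_length); equivalence is about the return value.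

-- shared by both ports: base_addr = int(addr["base_addr"], 0)  (none = KeyError/ValueError)
def pvParseBase (addr : List (String × String)) : Option Int :=
  match (PySem.Dict.ofList addr).get? "base_addr" with
  | none => none
  | some s => PySem.Int.ofStrBase? s 0

-- ===== PORT A =====
-- A's first while-loop: leading_one <<= 1 until base_addr & leading_one != 0.
-- Fuel makes the loop total; with fuel = bitLength base_addr it is never exhausted (proved below).
def pvLowBitLoop (base_addr leading_one : Int) : Nat → Int
  | 0 => leading_one
  | Nat.succ fuel =>
      if PySem.Int.band base_addr leading_one ≠ 0 then leading_one
      else pvLowBitLoop base_addr (leading_one <<< (1 : Nat)) fuel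

-- A's second while-loop: i <<= 1 until i >= min_size (hi is only the totality invariant 1 ≤ i).
def pvPow2Loop (min_size i : Int) (hi : 1 ≤ i) : Int :=
  if min_size ≤ i <<< (1 : Nat) then i <<< (1 : Nat)
  else pvPow2Loop min_size (i <<< (1 : Nat)) (by rw [Int.shiftLeft_eq]; omega)
  termination_by (min_size - i).toNat
  decreasing_by rw [Int.shiftLeft_eq] at *; simp only [pow_one] at *; omega

def find_pow2_size (addr : List (String × String)) (min_size : Int) (next_value : Int) : Int :=
  match pvParseBase addr with
  | none => 0   -- Python raises here; excluded by Pre_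
  | some base_addr =>
    let diff := next_value - base_addr
    let diff :=
      if ¬ base_addr = 0 then
        let leading_one := pvLowBitLoop base_addr 1 (PySem.Int.bitLength base_addr)
        if leading_one ≤ diff then leading_one else diff
      else diff
    let i := pvPow2Loop min_size 1 (by norm_num)
    if i > diff then min_size else i
    -- the final `assert i >= 0x4` raises exactly outside Pre_ (see Pre_ below)

-- ===== PORT B =====
def find_pow2_size_alt (addr : List (String × String)) (min_size : Int) (next_value : Int) : Int :=
  match pvParseBase addr with
  | none => 0   -- Python raises here; excluded by Pre_
  | some base_addr =>
    let diff := next_value - base_addr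
    let diff :=
      if ¬ base_addr = 0 then min diff (PySem.Int.band base_addr (-base_addr)) else diff
    let i :=
      if min_size ≤ 2 then (2 : Int)
      else (1 : Int) <<< PySem.Int.bitLength (min_size - 1)
    if i > diff then min_size else i
    -- `assert i >= 0x4`: raises exactly outside Pre_, like A

-- ===== PRECONDITION & SPEC =====
-- closed form of the clamped diff both programs compute (used only to state Pre_)
def pvClampedDiff (b next_value : Int) : Int :=
  if b ≠ 0 then min (next_value - b) (PySem.Int.band b (-b)) else next_value - b

-- Pre_ excludes exactly the inputs where Python raises: a missing/unparsable
-- "base_addr" (KeyError/ValueError), and the inputs where the final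
-- `assert i >= 0x4` fails — the assert passes iff min_size ≥ 4, or min_size = 3
-- with a clamped diff of at least 4.
def Pre_find_pow2_size (addr : List (String × String)) (min_size : Int) (next_value : Int) : Prop :=
  pvParseBase addr ≠ none ∧
    (4 ≤ min_size ∨
      (min_size = 3 ∧ 4 ≤ pvClampedDiff ((pvParseBase addr).getD 0) next_value))
instance (addr : List (String × String)) (min_size : Int) (next_value : Int) : Decidable (Pre_find_pow2_size addr min_size next_value) := by unfold Pre_find_pow2_size; infer_instance

def pvWitness_find_pow2_size : (List (String × String)) × Int × Int :=
  ([("base_addr", "0x1234")], 64, 8192)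

def Spec_find_pow2_size (addr : List (String × String)) (min_size : Int) (next_value : Int) (out : Int) : Prop := out = find_pow2_size_alt addr min_size next_value
instance (addr : List (String × String)) (min_size : Int) (next_value : Int) (out : Int) : Decidable (Spec_find_pow2_size addr min_size next_value out) := by unfold Spec_find_pow2_size; infer_instance

-- ===== CLAIM (what is proved, stated in full; the proofs are below) =====
def Claim_equal_find_pow2_size : Prop := ∀ (addr : List (String × String)) (min_size : Int) (next_value : Int), Dom_find_pow2_size addr min_size next_value → Pre_find_pow2_size addr min_size next_value → Spec_find_pow2_size addr min_size next_value (find_pow2_size addr min_size next_value)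

-- ===== LEMMAS AND PROOFS =====

theorem pv_nat_and_even_even (m n : Nat) : (2*m) &&& (2*n) = 2*(m &&& n) := by
  apply Nat.eq_of_testBit_eq
  intro i
  simp only [Nat.testBit_and]
  rcases i with _ | i <;>
    simp [Nat.testBit_succ, Nat.testBit_zero, Nat.mul_mod_right]

theorem pv_nat_and_even_odd (m n : Nat) : (2*m) &&& (2*n+1) = 2*(m &&& n) := by
  apply Nat.eq_of_testBit_eq
  intro i
  simp only [Nat.testBit_and]
  rcases i with _ | i <;>
    simp [Nat.testBit_succ, Nat.mul_add_div, Nat.testBit_zero, Nat.mul_mod_right]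

theorem pv_nat_or_odd_odd (m n : Nat) : (2*m+1) ||| (2*n+1) = 2*(m ||| n)+1 := by
  apply Nat.eq_of_testBit_eq
  intro i
  simp only [Nat.testBit_or]
  rcases i with _ | i <;>
    simp [Nat.testBit_succ, Nat.mul_add_div, Nat.testBit_zero]

theorem pv_band_double (a b : Int) :
    PySem.Int.band (2*a) (2*b) = 2 * PySem.Int.band a b := by
  unfold PySem.Int.band
  by_cases ha : 0 ≤ a <;> by_cases hb : 0 ≤ b
  · rw [if_pos (by omega), if_pos (by omega), if_pos ha, if_pos hb]
    have h2a : (2*a).toNat = 2 * a.toNat := by omega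
    have h2b : (2*b).toNat = 2 * b.toNat := by omega
    rw [h2a, h2b, pv_nat_and_even_even]
    push_cast; ring
  · rw [if_pos (by omega), if_neg (by omega), if_pos ha, if_neg hb]
    have h2a : (2*a).toNat = 2 * a.toNat := by omega
    have h2b : (-(2*b) - 1).toNat = 2 * (-b-1).toNat + 1 := by omega
    rw [h2a, h2b, pv_nat_and_even_odd]
    have hle : a.toNat &&& (-b-1).toNat ≤ a.toNat := Nat.and_le_left
    omega
  · rw [if_neg (by omega), if_pos (by omega), if_neg ha, if_pos hb]
    have h2b : (2*b).toNat = 2 * b.toNat := by omega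
    have h2a : (-(2*a) - 1).toNat = 2 * (-a-1).toNat + 1 := by omega
    rw [h2b, h2a, pv_nat_and_even_odd]
    have hle : b.toNat &&& (-a-1).toNat ≤ b.toNat := Nat.and_le_left
    omega
  · rw [if_neg (by omega), if_neg (by omega), if_neg ha, if_neg hb]
    have h2a : (-(2*a) - 1).toNat = 2 * (-a-1).toNat + 1 := by omega
    have h2b : (-(2*b) - 1).toNat = 2 * (-b-1).toNat + 1 := by omega
    rw [h2a, h2b, pv_nat_or_odd_odd]
    omega

theorem pv_band_pow_mul (k : Nat) (a b : Int) :
    PySem.Int.band (2^k * a) (2^k * b) = 2^k * PySem.Int.band a b := by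
  induction k generalizing a b with
  | zero => simp
  | succ k ih =>
    have e1 : (2:Int)^(k+1) * a = 2 * (2^k * a) := by ring
    have e2 : (2:Int)^(k+1) * b = 2 * (2^k * b) := by ring
    rw [e1, e2, pv_band_double, ih]; ring

theorem pv_mod2_of_odd (c : Int) (hc : Odd c) : PySem.Int.mod c 2 = 1 := by
  rcases PySem.Int.mod_two_eq c with h | h
  · exfalso
    obtain ⟨x, hx⟩ := (PySem.Int.mod_eq_zero_iff_dvd c 2).mp h
    exact (Int.not_even_iff_odd.mpr hc) ⟨x, by omega⟩
  · exact h

theorem pv_mod2_of_even (c : Int) (hc : (2:Int) ∣ c) : PySem.Int.mod c 2 = 0 :=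
  (PySem.Int.mod_eq_zero_iff_dvd c 2).mpr hc

theorem pv_nat_and_pred_of_odd (m : Nat) (hm : m % 2 = 1) : m &&& (m-1) = m-1 := by
  obtain ⟨j, hj⟩ : ∃ j, m = 2*j+1 := ⟨m/2, by omega⟩
  subst hj
  have : (2*j+1) &&& (2*j) = 2*j := by
    rw [Nat.and_comm, pv_nat_and_even_odd, Nat.and_self]
  simpa using this

theorem pv_band_neg_self_odd (c : Int) (hc : Odd c) : PySem.Int.band c (-c) = 1 := by
  have hc0 : c ≠ 0 := by rintro rfl; exact (Int.not_even_iff_odd.mpr hc) ⟨0, rfl⟩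
  obtain ⟨j, hj⟩ := hc
  unfold PySem.Int.band
  rcases lt_or_gt_of_ne hc0 with hneg | hpos
  · rw [if_neg (by omega), if_pos (by omega)]
    have hm : (-c).toNat % 2 = 1 := by omega
    have h1 : (-c - 1).toNat = (-c).toNat - 1 := by omega
    rw [h1, pv_nat_and_pred_of_odd _ hm]
    omega
  · rw [if_pos (by omega), if_neg (by omega)]
    have hm : c.toNat % 2 = 1 := by omega
    have h1 : (-(-c) - 1).toNat = c.toNat - 1 := by omega
    rw [h1, pv_nat_and_pred_of_odd _ hm]
    omega

theorem pv_band_neg_self (t : Nat) (c : Int) (hc : Odd c) :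
    PySem.Int.band (2^t * c) (-(2^t * c)) = 2^t := by
  have e : -(2^t * c) = 2^t * (-c) := by ring
  rw [e, pv_band_pow_mul, pv_band_neg_self_odd c hc, mul_one]

theorem pv_band_pow_lt (t k : Nat) (c : Int) (_hc : Odd c) (hk : k < t) :
    PySem.Int.band (2^t * c) (2^k) = 0 := by
  have ek : (2:Int)^t * c = 2^k * (2^(t-k) * c) := by
    rw [← mul_assoc, ← pow_add]
    congr 2
    omega
  have e1 : PySem.Int.band (2^t*c) (2^k) = PySem.Int.band (2^k*(2^(t-k)*c)) (2^k*1) := by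
    rw [← ek, mul_one]
  rw [e1, pv_band_pow_mul, PySem.Int.band_one, pv_mod2_of_even, mul_zero]
  have : (2:Int) ∣ 2^(t-k) := dvd_pow_self 2 (by omega)
  exact this.mul_right c

theorem pv_band_pow_self (t : Nat) (c : Int) (hc : Odd c) :
    PySem.Int.band (2^t * c) (2^t) = 2^t := by
  have e1 : PySem.Int.band (2^t*c) (2^t) = PySem.Int.band (2^t*c) (2^t*1) := by
    rw [mul_one]
  rw [e1, pv_band_pow_mul, PySem.Int.band_one, pv_mod2_of_odd c hc, mul_one]

theorem pv_exists_odd_factor (b : Int) (hb : b ≠ 0) :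
    ∃ (t : Nat) (c : Int), Odd c ∧ b = 2^t * c := by
  obtain ⟨t, m, hm, he⟩ := Nat.exists_eq_two_pow_mul_odd (n := b.natAbs) (by simpa using hb)
  by_cases h : 0 ≤ b
  · refine ⟨t, (m : Int), by exact_mod_cast hm, ?_⟩
    have hb2 : b = (b.natAbs : Int) := by omega
    rw [hb2, he]; push_cast; ring
  · refine ⟨t, -(m : Int), by exact (Odd.neg (by exact_mod_cast hm)), ?_⟩
    have hb2 : b = -(b.natAbs : Int) := by omega
    rw [hb2, he]; push_cast; ring

theorem pv_shl1 (i : Int) : i <<< (1 : Nat) = 2 * i := by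
  rw [Int.shiftLeft_eq]; ring

-- the lowest-set-bit loop computes b & -b (invariant: leading = 2^k with all bits below k clear)
theorem pv_lowBitLoop_eq (fuel t k : Nat) (c : Int) (hc : Odd c)
    (hk : k ≤ t) (hf : t + 1 - k ≤ fuel) :
    pvLowBitLoop (2^t * c) (2^k) fuel = 2^t := by
  induction fuel generalizing k with
  | zero => omega
  | succ fuel ih =>
    rw [pvLowBitLoop]
    rcases Nat.eq_or_lt_of_le hk with rfl | hlt
    · rw [if_pos (show PySem.Int.band (2^k*c) (2^k) ≠ 0 by
        rw [pv_band_pow_self k c hc]; positivity)]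
    · rw [if_neg (by simp [pv_band_pow_lt t k c hc hlt])]
      have e : (2:Int)^k <<< (1:Nat) = 2^(k+1) := by rw [pv_shl1, pow_succ]; ring
      rw [e]
      exact ih (k+1) hlt (by omega)

theorem pv_lowBit_main (b : Int) (hb : b ≠ 0) :
    pvLowBitLoop b 1 (PySem.Int.bitLength b) = PySem.Int.band b (-b) := by
  obtain ⟨t, c, hc, rfl⟩ := pv_exists_odd_factor b hb
  have hc0 : c ≠ 0 := by rintro rfl; exact (Int.not_even_iff_odd.mpr hc) ⟨0, rfl⟩
  have hna : (2^t : Nat) ≤ (2^t * c).natAbs := by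
    rw [Int.natAbs_mul]
    have h1 : (2^t : Int).natAbs = 2^t := by simp [Int.natAbs_pow]
    have h2 : 1 ≤ c.natAbs := by omega
    calc (2^t : Nat) = 2^t * 1 := by ring
    _ ≤ (2^t : Int).natAbs * c.natAbs := by rw [h1]; exact Nat.mul_le_mul_left _ h2
    _ = _ := rfl
  have ht : t + 1 ≤ PySem.Int.bitLength (2^t * c) := by
    have := PySem.Int.lt_two_pow_bitLength (2^t * c)
    have h2 : (2:Nat)^t < 2^(PySem.Int.bitLength (2^t * c)) := by omega
    have := (Nat.pow_lt_pow_iff_right (by norm_num : 1 < 2)).mp h2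
    omega
  have e1 : (1 : Int) = 2^(0:Nat) := by norm_num
  rw [e1, pv_lowBitLoop_eq _ t 0 c hc (by omega) (by omega), pv_band_neg_self t c hc]

-- the doubling loop: smallest power of two ≥ min_size, never below 2
theorem pv_pow2_small (ms : Int) (h : ms ≤ 2) (hi : (1:Int) ≤ 1) :
    pvPow2Loop ms 1 hi = 2 := by
  rw [pvPow2Loop]
  rw [if_pos (by rw [pv_shl1]; omega), pv_shl1]
  norm_num

theorem pv_pow2_aux (ms : Int) (L : Nat)
    (hub : ms ≤ 2^L) (hlb : (2:Int)^(L-1) < ms) :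
    ∀ (d k : Nat) (hi : (1:Int) ≤ 2^k), L - (k+1) ≤ d → k+1 ≤ L →
      pvPow2Loop ms (2^k) hi = 2^L := by
  intro d
  induction d with
  | zero =>
    intro k hi hd hkL
    have hkL' : k + 1 = L := by omega
    have e : (2:Int)^k <<< (1:Nat) = 2^(k+1) := by rw [pv_shl1, pow_succ]; ring
    rw [pvPow2Loop]
    split_ifs with hcond
    · rw [e, hkL']
    · exfalso
      rw [e, hkL'] at hcond
      exact hcond hub
  | succ d ih =>
    intro k hi hd hkL
    have e : (2:Int)^k <<< (1:Nat) = 2^(k+1) := by rw [pv_shl1, pow_succ]; ring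
    rw [pvPow2Loop]
    split_ifs with hcond
    · rw [e] at hcond ⊢
      have hk1 : L - 1 < k + 1 := by
        by_contra hcon
        have h1 : k + 1 ≤ L - 1 := by omega
        have h3 : (2:Int)^(k+1) ≤ 2^(L-1) := by
          have h2 := Nat.pow_le_pow_right (by norm_num : 1 ≤ 2) h1
          exact_mod_cast Nat.cast_le.mpr h2
        omega
      have hfin : k + 1 = L := by omega
      rw [hfin]
    · rw [e] at hcond
      have hk1 : k + 1 < L := by
        by_contra hcon
        have hfin : k + 1 = L := by omega
        rw [hfin] at hcond
        exact hcond hub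
      have hres := ih (k+1) (one_le_pow₀ (by norm_num)) (by omega) (by omega)
      simp only [e]
      exact hres

theorem pv_pow2_main (ms : Int) (hi : (1:Int) ≤ 1) :
    pvPow2Loop ms 1 hi =
      (if ms ≤ 2 then (2:Int) else (1 : Int) <<< PySem.Int.bitLength (ms - 1)) := by
  by_cases h : ms ≤ 2
  · rw [if_pos h, pv_pow2_small ms h]
  · rw [if_neg h]
    have h3 : 3 ≤ ms := by omega
    set L := PySem.Int.bitLength (ms - 1) with hL
    have hA : ((ms - 1).natAbs : Int) = ms - 1 := Int.natAbs_of_nonneg (by omega)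
    have hub : ms ≤ 2^L := by
      have h1 : ((ms - 1).natAbs : Int) < (2:Int)^L := by
        exact_mod_cast PySem.Int.lt_two_pow_bitLength (ms - 1)
      omega
    have hlb : (2:Int)^(L-1) < ms := by
      have h1 : (2:Int)^(L-1) ≤ ((ms - 1).natAbs : Int) := by
        exact_mod_cast PySem.Int.two_pow_bitLength_le (ms - 1) (by omega)
      omega
    have hL1 : 1 ≤ L := by
      by_contra hcon
      have hL0 : L = 0 := by omega
      rw [hL0] at hub
      norm_num at hub
      omega
    have eL : (1 : Int) <<< L = 2^L := by rw [Int.shiftLeft_eq]; ring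
    rw [eL]
    have hres := pv_pow2_aux ms L hub hlb L 0 (by norm_num) (by omega) (by omega)
    simpa using hres

theorem find_pow2_size_eq (addr : List (String × String)) (min_size next_value : Int) :
    find_pow2_size addr min_size next_value = find_pow2_size_alt addr min_size next_value := by
  unfold find_pow2_size find_pow2_size_alt
  cases hp : pvParseBase addr with
  | none => rfl
  | some b =>
    simp only []
    rw [pv_pow2_main]
    by_cases hb : b = 0
    · simp [hb]
    · simp only [hb, not_false_iff, if_true]
      rw [pv_lowBit_main b hb]
      have : (if PySem.Int.band b (-b) ≤ next_value - b then PySem.Int.band b (-b)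
              else next_value - b)
           = min (next_value - b) (PySem.Int.band b (-b)) := by
        rw [min_def]; split_ifs <;> omega
      rw [this]

-- ===== VERDICT (by name: the statement is the Claim_ definition above) =====
theorem find_pow2_size_spec : Claim_equal_find_pow2_size := by
  intro addr min_size next_value _ _
  unfold Spec_find_pow2_size
  exact find_pow2_size_eq addr min_size next_value
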